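-- pv_equiv track=rewrite | github.com/rpycgo/Algorithm | BOJ/Python/Data Structure/9935.py | solution
-- ===== SOURCE A (Python) =====
-- def solution(string: str, exploding_string: str):
--     stack = []
--     length = len(exploding_string)
--     for char in string:
--         stack.append(char)
--
--         if ''.join(stack[-length:]) == exploding_string:
--             for _ in range(length):
--                 stack.pop()
--
--     return ''.join(stack) if stack else 'FRULA'
-- ===== SOURCE B (Python) =====
-- def solution(string: str, exploding_string: str):
--     # Repeatedly delete the leftmost occurrence of the bomb; equals the stack sweep.
--     if not exploding_string:
--         return string if string else 'FRULA'
--     m = len(exploding_string)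
--     s = string
--     while True:
--         i = s.find(exploding_string)
--         if i == -1:
--             break
--         s = s[:i] + s[i + m:]
--     return s if s else 'FRULA'
-- ===== Notes on version B (the rewrite author's own statement) =====
-- stated objective: alternative
-- what changed: Replaces the per-character stack with suffix comparison by a loop that repeatedly finds (str.find) and deletes the leftmost occurrence of the bomb until none remains; the proof shows the stack sweep equals repeated leftmost deletion.
import Mathlib
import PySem

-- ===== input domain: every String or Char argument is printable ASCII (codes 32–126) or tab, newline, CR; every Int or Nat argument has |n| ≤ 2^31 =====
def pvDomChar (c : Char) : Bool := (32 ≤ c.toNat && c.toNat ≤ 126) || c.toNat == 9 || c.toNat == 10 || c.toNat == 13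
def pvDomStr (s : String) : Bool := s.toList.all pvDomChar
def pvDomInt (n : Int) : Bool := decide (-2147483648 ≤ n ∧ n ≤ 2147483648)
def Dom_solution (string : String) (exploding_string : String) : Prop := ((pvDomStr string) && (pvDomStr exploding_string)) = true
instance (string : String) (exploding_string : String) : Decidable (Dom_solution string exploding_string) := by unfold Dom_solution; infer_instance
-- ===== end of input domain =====

-- B replaces A's per-character stack sweep by repeated deletion of the leftmost occurrence via str.find; equivalence of the two strategies is proved below.

-- ===== PORT A =====
-- one loop iteration: append char, compare stack[-length:] with the bomb, pop `length` times on a match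
-- (stack.pop() is ported as dropLast: exact here, since a match forces length ≤ len(stack), so pop never sees an empty list)
def pvStepA (length : Int) (e : List Char) (stack : List Char) (c : Char) : List Char :=
  if PySem.List.slice (stack ++ [c]) (some (-length)) none = e then
    (PySem.List.pyRange 0 length).foldl (fun st _ => st.dropLast) (stack ++ [c])
  else stack ++ [c]

def solution (string : String) (exploding_string : String) : String :=
  let e := exploding_string.toList
  let length : Int := (e.length : Int)
  let stack := string.toList.foldl (pvStepA length e) []
  if stack ≠ [] then String.ofList stack else "FRULA"

-- ===== PORT B =====
-- termination measure for the removal loop (cited by name in decreasing_by)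
theorem pv_remove_dec (e : List Char) (he : e ≠ []) (s : List Char)
    (hi : ¬ PySem.Chars.find s e = -1) :
    (PySem.List.slice s none (some (PySem.Chars.find s e)) ++
      PySem.List.slice s (some (PySem.Chars.find s e + (e.length : Int))) none).length < s.length := by
  have hs := PySem.Chars.findFrom_natCast_spec s e 0 (Nat.zero_le _)
  simp only [Nat.cast_zero, PySem.Chars.findFrom_zero] at hs
  obtain ⟨hge, hpre, -⟩ := hs hi
  have hm : e.length ≤ s.length - (PySem.Chars.find s e).toNat := by
    simpa using hpre.length_le
  have hel : 0 < e.length := List.length_pos_iff.mpr he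
  have hge' : (0 : Int) ≤ (e.length : Int) := by positivity
  rw [PySem.List.slice_to s hge, PySem.List.slice_from s (by omega)]
  simp only [List.length_append, List.length_take, List.length_drop,
    Int.toNat_add hge hge', Int.toNat_natCast]
  omega

-- while True: i = s.find(e); if i == -1: break; s = s[:i] + s[i+m:]
-- (the e ≠ [] hypothesis mirrors Source B's early return for an empty bomb and gives termination)
def pvRemoveLoop (e : List Char) (he : e ≠ []) (s : List Char) : List Char :=
  let i := PySem.Chars.find s e
  if hi : i = -1 then s
  else pvRemoveLoop e he (PySem.List.slice s none (some i) ++ PySem.List.slice s (some (i + (e.length : Int))) none)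
termination_by s.length
decreasing_by exact pv_remove_dec e he s hi

def solution_alt (string : String) (exploding_string : String) : String :=
  let e := exploding_string.toList
  if he : e = [] then
    (if string.toList ≠ [] then String.ofList string.toList else "FRULA")
  else
    let s := pvRemoveLoop e he string.toList
    if s ≠ [] then String.ofList s else "FRULA"

-- ===== PRECONDITION & SPEC =====
def Spec_solution (string : String) (exploding_string : String) (out : String) : Prop := out = solution_alt string exploding_string
instance (string : String) (exploding_string : String) (out : String) : Decidable (Spec_solution string exploding_string out) := by unfold Spec_solution; infer_instance

-- ===== CLAIM (what is proved, stated in full; the proofs are below) =====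
def Claim_equal_solution : Prop := ∀ (string : String) (exploding_string : String), Dom_solution string exploding_string → Spec_solution string exploding_string (solution string exploding_string)

-- ===== LEMMAS AND PROOFS =====

-- iterated dropLast is take
theorem pv_foldl_dropLast {α : Type} (n : Nat) (xs : List α) :
    (List.range n).foldl (fun (st : List α) _ => st.dropLast) xs = xs.take (xs.length - n) := by
  induction n generalizing xs with
  | zero => simp
  | succ k ih =>
    rw [List.range_succ, List.foldl_append]
    simp only [List.foldl_cons, List.foldl_nil]
    rw [ih, List.dropLast_eq_take, List.take_take, List.length_take]
    congr 1
    omega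

-- A's match test is exactly "e is a suffix of the stack" (for e ≠ [])
theorem pv_match_iff (e stack : List Char) (he : e ≠ []) :
    (PySem.List.slice stack (some (-(e.length : Int))) none = e) ↔ e <:+ stack := by
  rw [PySem.List.slice_from_neg_natCast stack e.length (List.length_pos_iff.mpr he)]
  rw [List.suffix_iff_eq_drop]
  exact ⟨fun h => h.symm, fun h => h.symm⟩

-- A's step in closed form (e ≠ [])
theorem pv_stepA_eq (e : List Char) (he : e ≠ []) (st : List Char) (c : Char) :
    pvStepA (e.length : Int) e st c =
      if e <:+ (st ++ [c]) then (st ++ [c]).take ((st ++ [c]).length - e.length) else st ++ [c] := by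
  unfold pvStepA
  by_cases hsuf : e <:+ st ++ [c]
  · rw [if_pos ((pv_match_iff e (st ++ [c]) he).mpr hsuf), if_pos hsuf,
      PySem.List.pyRange_zero_natCast, List.foldl_map, pv_foldl_dropLast]
  · rw [if_neg (fun h => hsuf ((pv_match_iff e (st ++ [c]) he).mp h)), if_neg hsuf]

-- processing a block none of whose prefixes (appended to the stack) ends in e leaves the stack append-only
theorem pv_clean_run (e : List Char) (he : e ≠ []) :
    ∀ (cs st : List Char), (∀ q, q <+: cs → ¬ e <:+ st ++ q) →
      cs.foldl (pvStepA (e.length : Int) e) st = st ++ cs := by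
  intro cs
  induction cs with
  | nil => intro st _; simp
  | cons c cs' ih =>
    intro st h
    rw [List.foldl_cons, pv_stepA_eq e he]
    rw [if_neg (h [c] ⟨cs', rfl⟩)]
    rw [ih (st ++ [c]) (fun q hq => by
      have := h (c :: q) (by obtain ⟨t, ht⟩ := hq; exact ⟨t, by simp [← ht]⟩)
      simpa using this)]
    simp

-- a prefix of s shorter than i + |e| has no suffix e, when i is the leftmost occurrence
theorem pv_no_suffix (e s : List Char) (i : Nat)
    (hmin : ∀ j, j < i → ¬ e <+: s.drop j) (k : Nat) (hk : k < i + e.length) :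
    ∀ q, q <+: s.take k → ¬ e <:+ ([] : List Char) ++ q := by
  intro q hq hsuf
  obtain ⟨u, hu⟩ := hsuf
  simp only [List.nil_append] at hu
  have hqpre : q <+: s := hq.trans (List.take_prefix _ _)
  have hql : q.length ≤ k := le_trans hq.length_le (by simp)
  have hdrop : e <+: s.drop u.length := by
    obtain ⟨t, ht⟩ := hqpre
    refine ⟨t, ?_⟩
    have hs : s = u ++ (e ++ t) := by rw [← ht, ← hu]; simp
    rw [hs]
    simp
  have hul : u.length < i := by
    have hq2 : q.length = u.length + e.length := by rw [← hu]; simp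
    omega
  exact hmin u.length hul hdrop

-- deleting the leftmost occurrence commutes with A's stack process
theorem pv_remove_step (e : List Char) (he : e ≠ []) (s : List Char) (i : Nat)
    (hocc : e <+: s.drop i) (hmin : ∀ j, j < i → ¬ e <+: s.drop j) :
    s.foldl (pvStepA (e.length : Int) e) [] =
      (s.take i ++ s.drop (i + e.length)).foldl (pvStepA (e.length : Int) e) [] := by
  have hm0 : 0 < e.length := List.length_pos_iff.mpr he
  have hlen : i + e.length ≤ s.length := by
    have h1 := hocc.length_le
    have h2 : i ≤ s.length := by
      by_contra h
      rw [List.drop_eq_nil_of_le (le_of_not_ge h)] at hocc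
      exact he (List.prefix_nil.mp hocc)
    simp at h1; omega
  have hocc_take : s.take (i + e.length) = s.take i ++ e := by
    obtain ⟨t, ht⟩ := hocc
    rw [List.take_add, ← ht]
    congr 1
    exact List.take_left' rfl
  have htake : s.take (i + e.length) = s.take (i + e.length - 1) ++ [s[i + e.length - 1]'(by omega)] := by
    have h1 : i + e.length = (i + e.length - 1) + 1 := by omega
    conv_lhs => rw [h1]
    rw [List.take_add_one, List.getElem?_eq_getElem (by omega)]
    simp
  have h1 : (s.take (i + e.length - 1)).foldl (pvStepA (e.length : Int) e) [] = s.take (i + e.length - 1) := by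
    have := pv_clean_run e he (s.take (i + e.length - 1)) []
      (pv_no_suffix e s i hmin (i + e.length - 1) (by omega))
    simpa using this
  have hA1 : (s.take (i + e.length)).foldl (pvStepA (e.length : Int) e) [] = s.take i := by
    rw [htake, List.foldl_append, h1]
    simp only [List.foldl_cons, List.foldl_nil]
    rw [pv_stepA_eq e he, ← htake]
    rw [if_pos ⟨s.take i, hocc_take.symm⟩]
    rw [List.length_take, List.take_take]
    congr 1
    omega
  have hA2 : (s.take i).foldl (pvStepA (e.length : Int) e) [] = s.take i := by
    have := pv_clean_run e he (s.take i) []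
      (pv_no_suffix e s i hmin i (by omega))
    simpa using this
  calc s.foldl (pvStepA (e.length : Int) e) []
      = (s.take (i + e.length) ++ s.drop (i + e.length)).foldl (pvStepA (e.length : Int) e) [] := by
        rw [List.take_append_drop]
    _ = (s.drop (i + e.length)).foldl (pvStepA (e.length : Int) e)
          ((s.take (i + e.length)).foldl (pvStepA (e.length : Int) e) []) := by
        rw [List.foldl_append]
    _ = (s.drop (i + e.length)).foldl (pvStepA (e.length : Int) e) (s.take i) := by rw [hA1]
    _ = (s.take i ++ s.drop (i + e.length)).foldl (pvStepA (e.length : Int) e) [] := by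
        rw [List.foldl_append, hA2]

-- A's stack process computes B's repeated leftmost deletion
theorem pv_main (e : List Char) (he : e ≠ []) (s : List Char) :
    s.foldl (pvStepA (e.length : Int) e) [] = pvRemoveLoop e he s := by
  induction hn : s.length using Nat.strong_induction_on generalizing s with
  | _ n ih =>
  rw [pvRemoveLoop]
  by_cases hi : PySem.Chars.find s e = -1
  · rw [dif_pos hi]
    rw [PySem.Chars.find_eq_neg_one_iff] at hi
    have := pv_clean_run e he s [] (fun q hq hsuf => by
      apply hi
      obtain ⟨u, hu⟩ := hsuf
      obtain ⟨t, ht⟩ := hq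
      simp only [List.nil_append] at hu
      exact ⟨u, t, by rw [← ht, ← hu]⟩)
    simpa using this
  · rw [dif_neg hi]
    have hs := PySem.Chars.findFrom_natCast_spec s e 0 (Nat.zero_le _)
    simp only [Nat.cast_zero, PySem.Chars.findFrom_zero] at hs
    obtain ⟨hge, hpre, hmin⟩ := hs hi
    have hm0 : 0 < e.length := List.length_pos_iff.mpr he
    have hm : e.length ≤ s.length - (PySem.Chars.find s e).toNat := by
      simpa using hpre.length_le
    have hslice : PySem.List.slice s none (some (PySem.Chars.find s e)) ++
        PySem.List.slice s (some (PySem.Chars.find s e + (e.length : Int))) none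
        = s.take (PySem.Chars.find s e).toNat ++ s.drop ((PySem.Chars.find s e).toNat + e.length) := by
      rw [PySem.List.slice_to s hge, PySem.List.slice_from s (by positivity)]
      rw [Int.toNat_add hge (by positivity : (0:Int) ≤ (e.length : Int)), Int.toNat_natCast]
    rw [hslice]
    rw [pv_remove_step e he s (PySem.Chars.find s e).toNat hpre (fun j hj => hmin j (Nat.zero_le _) hj)]
    exact ih _ (by subst hn; simp [List.length_take]; omega) _ rfl

-- with an empty bomb, A never pops: the stack is just the input
theorem pv_empty_run (cs st : List Char) :
    cs.foldl (pvStepA ((([] : List Char).length : Int)) []) st = st ++ cs := by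
  induction cs generalizing st with
  | nil => simp
  | cons c cs' ih =>
    rw [List.foldl_cons]
    have hstep : pvStepA ((([] : List Char).length : Int)) [] st c = st ++ [c] := by
      unfold pvStepA
      rw [if_neg]
      rw [show ((([] : List Char).length : Int)) = 0 by simp, neg_zero,
        PySem.List.slice_from _ (le_refl 0)]
      simp
    rw [hstep, ih]
    simp

-- ===== VERDICT (by name: the statement is the Claim_ definition above) =====
theorem solution_spec : Claim_equal_solution := by
  intro string exploding_string _
  show solution string exploding_string = solution_alt string exploding_string
  unfold solution solution_alt
  dsimp only
  by_cases he : exploding_string.toList = []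
  · rw [dif_pos he, he, pv_empty_run]
    simp
  · rw [dif_neg he, pv_main _ he]
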